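-- pv_equiv track=rewrite | github.com/Buront2610/Fantasy_simulator | fantasy_simulator/language/engine.py | _tidy_word
-- ===== SOURCE A (Python) =====
-- from typing import Dict, Iterable, List, Mapping, Sequence
--
-- def _tidy_word(text: str) -> str:
--     result = text.lower().replace(" ", "")
--     for repeated in ("aaa", "eee", "iii", "ooo", "uuu"):
--         while repeated in result:
--             result = result.replace(repeated, repeated[:2])
--     collapsed: List[str] = []
--     for char in result:
--         if len(collapsed) >= 2 and collapsed[-1] == collapsed[-2] == char:
--             continue
--         collapsed.append(char)
--     return "".join(collapsed)
-- ===== SOURCE B (Python) =====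
-- def _tidy_word(text: str) -> str:
--     # One pass over maximal runs: lowercase, drop spaces, cap each run at 2 chars.
--     s = text.lower().replace(" ", "")
--     pieces = []
--     i = 0
--     n = len(s)
--     while i < n:
--         j = i
--         while j < n and s[j] == s[i]:
--             j += 1
--         pieces.append(s[i] * min(j - i, 2))
--         i = j
--     return "".join(pieces)
-- ===== Notes on version B (the rewrite author's own statement) =====
-- stated objective: simpler
-- what changed: B traverses the lowercased, space-free string by maximal runs of equal characters and emits each run capped at two, replacing A's five repeated whole-string vowel replace passes plus a char-by-char loop with a two-element lookback; the vowel passes are dropped as subsumed by run-capping.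
import Mathlib
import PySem

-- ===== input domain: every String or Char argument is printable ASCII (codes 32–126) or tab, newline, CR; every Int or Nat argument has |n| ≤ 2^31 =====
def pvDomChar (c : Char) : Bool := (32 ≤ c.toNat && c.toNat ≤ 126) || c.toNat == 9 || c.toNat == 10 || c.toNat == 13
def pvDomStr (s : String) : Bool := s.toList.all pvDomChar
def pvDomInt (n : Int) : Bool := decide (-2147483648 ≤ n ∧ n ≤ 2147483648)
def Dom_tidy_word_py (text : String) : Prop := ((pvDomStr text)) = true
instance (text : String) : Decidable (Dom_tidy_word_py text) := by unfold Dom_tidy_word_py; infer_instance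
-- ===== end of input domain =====

-- B walks the lowercased, space-free string by maximal runs (each capped at two chars)
-- instead of A's repeated vowel replace passes plus a char loop with two-element lookback.

-- ===== PORT A =====
-- 'while repeated in result: result = result.replace(repeated, repeated[:2])':
-- each iteration with the pattern present shortens result, so fuel = length + 1 never runs out.
def tidyWhileRep (fuel : Nat) (pat result : String) : String :=
  match fuel with
  | 0 => result
  | f + 1 =>
    if PySem.Str.isIn pat result then
      tidyWhileRep f pat (PySem.Str.replace result pat (PySem.Str.slice pat (some 0) (some 2)))
    else result

def tidy_word_py (text : String) : String :=
  let result := PySem.Str.replace (PySem.Str.lower text) " " ""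
  let result := ["aaa", "eee", "iii", "ooo", "uuu"].foldl
    (fun r pat => tidyWhileRep (r.toList.length + 1) pat r) result
  let collapsed := result.toList.foldl
    (fun collapsed char =>
      if 2 ≤ collapsed.length ∧ PySem.List.pyGet? collapsed (-1) = some char ∧
          PySem.List.pyGet? collapsed (-2) = some char then
        collapsed
      else collapsed ++ [char]) ([] : List Char)
  String.ofList collapsed

-- ===== PORT B =====
-- inner 'while j < n and s[j] == s[i]' : length of the run of c at the front of the rest
def tidyRunLen (c : Char) : List Char → Nat
  | [] => 0
  | a :: t => if a = c then tidyRunLen c t + 1 else 0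

-- outer while: emit each maximal run capped at two characters
def tidyRunScan : List Char → List Char
  | [] => []
  | c :: rest =>
    let k := tidyRunLen c rest
    List.replicate (min (k + 1) 2) c ++ tidyRunScan (rest.drop k)
termination_by l => l.length
decreasing_by simp; try omega

def tidy_word_py_alt (text : String) : String :=
  let s := PySem.Str.replace (PySem.Str.lower text) " " ""
  String.ofList (tidyRunScan s.toList)

-- ===== PRECONDITION & SPEC =====
def Spec_tidy_word_py (text : String) (out : String) : Prop := out = tidy_word_py_alt text
instance (text : String) (out : String) : Decidable (Spec_tidy_word_py text out) := by unfold Spec_tidy_word_py; infer_instance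

-- ===== CLAIM (what is proved, stated in full; the proofs are below) =====
def Claim_equal_tidy_word_py : Prop := ∀ (text : String), Dom_tidy_word_py text → Spec_tidy_word_py text (tidy_word_py text)

-- ===== LEMMAS AND PROOFS =====

-- canonical form: emit chars left to right, skipping a char equal to the last two emitted
def tidyEm : Option Char → Option Char → List Char → List Char
  | _, _, [] => []
  | s1, s2, ch :: rest =>
    if s1 = some ch ∧ s2 = some ch then tidyEm s1 s2 rest
    else ch :: tidyEm (some ch) s1 rest

lemma pyGet_append_neg_one (acc : List Char) (ch : Char) :
    PySem.List.pyGet? (acc ++ [ch]) (-1) = some ch := by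
  simp [PySem.List.pyGet?, PySem.List.pyIdx?]

lemma pyGet_append_neg_two (acc : List Char) (ch : Char) :
    PySem.List.pyGet? (acc ++ [ch]) (-2) = PySem.List.pyGet? acc (-1) := by
  cases acc with
  | nil => rfl
  | cons a t =>
    have hL : ((a :: t) ++ [ch]).length = t.length + 2 := by simp
    have hR : (a :: t).length = t.length + 1 := by simp
    simp only [PySem.List.pyGet?, hL, hR]
    have e1 : PySem.List.pyIdx? (t.length + 2) (-2) = some t.length := by
      simp only [PySem.List.pyIdx?]
      rw [if_neg (by norm_num), if_pos (by push_cast; omega)]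
      norm_num
      omega
    have e2 : PySem.List.pyIdx? (t.length + 1) (-1) = some t.length := by
      simp only [PySem.List.pyIdx?]
      rw [if_neg (by norm_num), if_pos (by push_cast; omega)]
      norm_num
    rw [e1, e2]
    simp [List.getElem?_append_left (show t.length < (a :: t).length by simp)]
    first
    | exact List.getElem_append_left (by simp)
    | (simp only [← List.cons_append]; exact List.getElem_append_left (by simp))

lemma pyGet_neg_two_some_len {acc : List Char} {c : Char}
    (h : PySem.List.pyGet? acc (-2) = some c) : 2 ≤ acc.length := by
  by_contra hlt
  simp [PySem.List.pyGet?, PySem.List.pyIdx?] at h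
  split_ifs at h <;> simp_all

-- A's collapsing foldl is tidyEm driven by the last two elements of the accumulator
lemma foldA_em : ∀ (l acc : List Char),
    l.foldl (fun collapsed char =>
      if 2 ≤ collapsed.length ∧ PySem.List.pyGet? collapsed (-1) = some char ∧
          PySem.List.pyGet? collapsed (-2) = some char then
        collapsed
      else collapsed ++ [char]) acc
    = acc ++ tidyEm (PySem.List.pyGet? acc (-1)) (PySem.List.pyGet? acc (-2)) l := by
  intro l
  induction l with
  | nil => intro acc; simp [tidyEm]
  | cons ch rest ih =>
    intro acc
    simp only [List.foldl]
    by_cases h1 : PySem.List.pyGet? acc (-1) = some ch ∧ PySem.List.pyGet? acc (-2) = some ch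
    · have hl : 2 ≤ acc.length := pyGet_neg_two_some_len h1.2
      rw [if_pos ⟨hl, h1.1, h1.2⟩, ih acc]
      conv_rhs => rw [tidyEm]
      rw [if_pos h1]
    · have hcond : ¬ (2 ≤ acc.length ∧ PySem.List.pyGet? acc (-1) = some ch ∧
          PySem.List.pyGet? acc (-2) = some ch) := fun hc => h1 ⟨hc.2.1, hc.2.2⟩
      rw [if_neg hcond, ih (acc ++ [ch]), pyGet_append_neg_one, pyGet_append_neg_two]
      conv_rhs => rw [tidyEm]
      rw [if_neg h1]
      simp

-- after two equal chars the lookback state is (c, c), whatever it was before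
lemma em_cc (s1 s2 : Option Char) (c : Char) (X : List Char) :
    tidyEm s1 s2 (c :: c :: X)
    = (if s1 = some c ∧ s2 = some c then [] else if s1 = some c then [c] else [c, c])
      ++ tidyEm (some c) (some c) X := by
  by_cases h1 : s1 = some c ∧ s2 = some c
  · obtain ⟨ha, hb⟩ := h1
    simp [tidyEm, ha, hb]
  · by_cases h2 : s1 = some c
    · have hs2 : ¬ s2 = some c := fun hh => h1 ⟨h2, hh⟩
      simp [tidyEm, h2, hs2]
    · simp [tidyEm, h1, h2]

lemma em_skip (c : Char) : ∀ (m : Nat) (X : List Char),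
    tidyEm (some c) (some c) (List.replicate m c ++ X) = tidyEm (some c) (some c) X := by
  intro m
  induction m with
  | zero => intro X; simp
  | succ n ih => intro X; simp [List.replicate, tidyEm, ih]

-- simple model of str.replace(c*3, c*2)
def tidyRep (c : Char) : List Char → List Char
  | c1 :: c2 :: c3 :: t =>
    if c1 = c ∧ c2 = c ∧ c3 = c then c :: c :: tidyRep c t
    else c1 :: tidyRep c (c2 :: c3 :: t)
  | l => l
termination_by l => l.length
decreasing_by all_goals (simp; try omega)

lemma go_step (c c1 : Char) (t acc : List Char) (f : Nat) :
    PySem.Chars.replace.go [c,c,c] [c,c] (f+1) (c1::t) acc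
    = if [c,c,c].isPrefixOf (c1::t) then
        PySem.Chars.replace.go [c,c,c] [c,c] f (List.drop 3 (c1::t)) ([c,c] ++ acc)
      else PySem.Chars.replace.go [c,c,c] [c,c] f t (c1::acc) := by
  simp [PySem.Chars.replace.go]

lemma go_rep (c : Char) : ∀ (fuel : Nat) (l acc : List Char), l.length ≤ fuel →
    PySem.Chars.replace.go [c,c,c] [c,c] fuel l acc = acc.reverse ++ tidyRep c l := by
  intro fuel
  induction fuel with
  | zero =>
    intro l acc h
    have hl : l = [] := List.eq_nil_of_length_eq_zero (by omega)
    subst hl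
    simp [PySem.Chars.replace.go, tidyRep]
  | succ f ih =>
    intro l acc h
    cases l with
    | nil => simp [PySem.Chars.replace.go, tidyRep]
    | cons c1 t =>
      rw [go_step]
      by_cases hpre : [c,c,c].isPrefixOf (c1::t)
      · rw [if_pos hpre]
        obtain ⟨t', ht⟩ := List.isPrefixOf_iff_prefix.mp hpre
        have hshape : c1 :: t = c :: c :: c :: t' := by rw [← ht]; rfl
        rw [hshape]
        have hlen : t'.length ≤ f := by
          have := congrArg List.length hshape
          simp at this h
          omega
        rw [show List.drop 3 (c :: c :: c :: t') = t' from rfl, ih t' ([c,c] ++ acc) hlen]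
        have : tidyRep c (c :: c :: c :: t') = c :: c :: tidyRep c t' := by
          simp [tidyRep]
        rw [this]
        simp
      · rw [if_neg hpre]
        rw [ih t (c1 :: acc) (by simp at h; omega)]
        have hne : tidyRep c (c1 :: t) = c1 :: tidyRep c t := by
          match t with
          | [] => simp [tidyRep]
          | [a] => simp [tidyRep]
          | a :: b :: tt =>
            have hnott : ¬ (c1 = c ∧ a = c ∧ b = c) := by
              rintro ⟨rfl, rfl, rfl⟩
              exact hpre (List.isPrefixOf_iff_prefix.mpr ⟨tt, rfl⟩)
            simp only [tidyRep, if_neg hnott]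
        rw [hne]
        simp

lemma replace_eq_rep (c : Char) (l : List Char) :
    PySem.Chars.replace l [c, c, c] [c, c] = tidyRep c l := by
  have : PySem.Chars.replace l [c,c,c] [c,c]
      = PySem.Chars.replace.go [c,c,c] [c,c] l.length l [] := by
    simp [PySem.Chars.replace]
  rw [this, go_rep c l.length l [] (le_refl _)]
  simp

lemma em_rep_aux (c : Char) : ∀ (n : Nat) (l : List Char), l.length ≤ n → ∀ (s1 s2 : Option Char),
    tidyEm s1 s2 (tidyRep c l) = tidyEm s1 s2 l := by
  intro n
  induction n with
  | zero =>
    intro l hl s1 s2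
    have hnil : l = [] := List.eq_nil_of_length_eq_zero (by omega)
    subst hnil
    simp [tidyRep]
  | succ n ih =>
    intro l hl s1 s2
    rcases l with _ | ⟨c1, _ | ⟨c2, _ | ⟨c3, t⟩⟩⟩
    · simp [tidyRep]
    · simp [tidyRep]
    · simp [tidyRep]
    · by_cases htriple : c1 = c ∧ c2 = c ∧ c3 = c
      · obtain ⟨h1, h2, h3⟩ := htriple
        rw [h1, h2, h3]
        rw [show tidyRep c (c :: c :: c :: t) = c :: c :: tidyRep c t from by simp [tidyRep]]
        rw [em_cc, em_cc, ih t (by simp at hl; omega)]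
        congr 1
        conv_rhs => rw [tidyEm]
        simp
      · rw [show tidyRep c (c1 :: c2 :: c3 :: t) = c1 :: tidyRep c (c2 :: c3 :: t) from by
          simp only [tidyRep, if_neg htriple]]
        by_cases hcond : s1 = some c1 ∧ s2 = some c1
        · conv_lhs => rw [tidyEm]
          conv_rhs => rw [tidyEm]
          rw [if_pos hcond, if_pos hcond, ih (c2 :: c3 :: t) (by simp at hl ⊢; omega)]
        · conv_lhs => rw [tidyEm]
          conv_rhs => rw [tidyEm]
          rw [if_neg hcond, if_neg hcond, ih (c2 :: c3 :: t) (by simp at hl ⊢; omega)]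

lemma em_rep (c : Char) (l : List Char) (s1 s2 : Option Char) :
    tidyEm s1 s2 (tidyRep c l) = tidyEm s1 s2 l :=
  em_rep_aux c l.length l (le_refl _) s1 s2

lemma em_while (c : Char) (pat : String) (hp : pat.toList = [c, c, c]) :
    ∀ (fuel : Nat) (r : String),
    tidyEm none none (tidyWhileRep fuel pat r).toList = tidyEm none none r.toList := by
  intro fuel
  induction fuel with
  | zero => intro r; rfl
  | succ f ih =>
    intro r
    rw [tidyWhileRep]
    by_cases hin : PySem.Str.isIn pat r
    · rw [if_pos hin, ih]
      have h2 : (PySem.Str.slice pat (some 0) (some 2)).toList = [c, c] := by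
        simp [PySem.Str.slice, hp, pysem, PySem.List.slice]
      have h3 : (PySem.Str.replace r pat (PySem.Str.slice pat (some 0) (some 2))).toList
          = PySem.Chars.replace r.toList [c,c,c] [c,c] := by
        simp [PySem.Str.replace, hp, h2]
      rw [h3, replace_eq_rep, em_rep]
    · rw [if_neg hin]

lemma runLen_split (c : Char) : ∀ l : List Char,
    l = List.replicate (tidyRunLen c l) c ++ l.drop (tidyRunLen c l) := by
  intro l
  induction l with
  | nil => rfl
  | cons a t ih =>
    by_cases ha : a = c
    · subst ha
      simp only [tidyRunLen, if_pos rfl, List.replicate, List.drop_succ_cons]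
      exact congrArg (a :: ·) ih
    · simp [tidyRunLen, ha]

lemma runLen_drop_head (c : Char) : ∀ (l : List Char) {d : Char},
    (l.drop (tidyRunLen c l)).head? = some d → d ≠ c := by
  intro l
  induction l with
  | nil => intro d h; simp at h
  | cons a t ih =>
    intro d h
    by_cases ha : a = c
    · subst ha
      rw [show tidyRunLen a (a :: t) = tidyRunLen a t + 1 from by simp [tidyRunLen]] at h
      exact ih (by simpa using h)
    · rw [show tidyRunLen c (a :: t) = 0 from by simp [tidyRunLen, ha]] at h
      simp at h
      subst h
      exact ha

lemma runLen_zero_head (c : Char) (l : List Char) {d : Char}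
    (h0 : tidyRunLen c l = 0) (h : l.head? = some d) : d ≠ c := by
  cases l with
  | nil => simp at h
  | cons a t =>
    simp at h
    subst h
    intro hdc
    simp [tidyRunLen, hdc] at h0

lemma em_runScan_aux : ∀ (n : Nat) (l : List Char), l.length ≤ n → ∀ (s1 s2 : Option Char),
    (∀ ch, l.head? = some ch → s1 ≠ some ch) → tidyEm s1 s2 l = tidyRunScan l := by
  intro n
  induction n with
  | zero =>
    intro l hl _ _ _
    have hnil : l = [] := List.eq_nil_of_length_eq_zero (by omega)
    subst hnil
    simp [tidyRunScan, tidyEm]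
  | succ n ih =>
    intro l hl s1 s2 hhead
    rcases l with _ | ⟨ch, rest⟩
    · simp [tidyRunScan, tidyEm]
    · have hs1 : s1 ≠ some ch := hhead ch rfl
      rw [show tidyRunScan (ch :: rest)
          = List.replicate (min (tidyRunLen ch rest + 1) 2) ch ++ tidyRunScan (rest.drop (tidyRunLen ch rest)) from by
        rw [tidyRunScan]]
      rcases hk : tidyRunLen ch rest with _ | m
      · -- run of length 1
        simp only [List.drop_zero, Nat.zero_add]
        conv_lhs => rw [tidyEm]
        rw [if_neg (fun hc => hs1 hc.1)]
        rw [ih rest (by simp at hl; omega) (some ch) s1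
          (fun d hd he => (runLen_zero_head ch rest hk hd) (Option.some.inj he).symm)]
        norm_num [List.replicate]
      · -- run of length m + 2 or more at the front
        have hsplit := runLen_split ch rest
        rw [hk] at hsplit
        have hshape : ch :: rest = ch :: ch :: (List.replicate m ch ++ rest.drop (m + 1)) := by
          conv_lhs => rw [hsplit]
          simp [List.replicate]
        rw [hshape, em_cc, em_skip]
        rw [ih (rest.drop (m + 1)) (by simp at hl ⊢; omega) (some ch) (some ch)
          (fun d hd he => (runLen_drop_head ch rest (by rw [hk]; exact hd)) (Option.some.inj he).symm)]
        rw [show min (m + 1 + 1) 2 = 2 from by omega]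
        rw [if_neg (fun hc => hs1 hc.1), if_neg hs1]
        rfl

lemma em_runScan (l : List Char) : tidyEm none none l = tidyRunScan l :=
  em_runScan_aux l.length l (le_refl _) none none (fun _ _ h => by cases h)

-- ===== VERDICT (by name: the statement is the Claim_ definition above) =====
theorem tidy_word_py_spec : Claim_equal_tidy_word_py := by
  intro text _
  unfold Spec_tidy_word_py tidy_word_py tidy_word_py_alt
  simp only []
  rw [foldA_em]
  rw [show PySem.List.pyGet? ([] : List Char) (-1) = none from rfl,
      show PySem.List.pyGet? ([] : List Char) (-2) = none from rfl]
  simp only [List.nil_append, List.foldl]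
  rw [em_while 'u' "uuu" rfl, em_while 'o' "ooo" rfl, em_while 'i' "iii" rfl,
      em_while 'e' "eee" rfl, em_while 'a' "aaa" rfl, em_runScan]
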